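-- pv_equiv track=rewrite | github.com/Promindz-Github/Pro-Works-Python | ProNetwork.py | idToPlace
-- ===== SOURCE A (Python) =====
-- def idToPlace(Id:str):
--     Next = Low = Up = False
--     Write = ""
--     if not Id.startswith(":") and not Id.endswith(":"):
--         return "ERROR"
--     Id = Id[1:]
--     Id = Id[:-1]
--     for I in Id:
--         if not Next:
--             if int(I) == 0:
--                 Low = True
--                 Next = True
--             if int(I) == 1:
--                 Up = True
--                 Next = True
--             if int(I) == 2:
--                 Write += "\\"
--         elif Next:
--             if Up:
--                 Write += I.upper()
--             elif Low:
--                 Write += I.lower()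
--             Next = Low = Up = False
--     return Write
-- ===== SOURCE B (Python) =====
-- def idToPlace(Id: str):
--     if not (Id.startswith(":") and Id.endswith(":")):
--         return "ERROR"
--     s = Id[1:-1]
--     out = []
--     i = 0
--     n = len(s)
--     while i < n:
--         d = int(s[i])
--         if d == 0:
--             if i + 1 < n:
--                 out.append(s[i + 1].lower())
--             i += 2
--         elif d == 1:
--             if i + 1 < n:
--                 out.append(s[i + 1].upper())
--             i += 2
--         elif d == 2:
--             out.append("\\")
--             i += 1
--         else:
--             i += 1
--     return "".join(out)
-- ===== Notes on version B (the rewrite author's own statement) =====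
-- stated objective: alternative
-- what changed: Replaced the Next/Low/Up boolean-flag state machine with a direct loop that consumes a control digit and its payload character together (advancing by 2 for digits 0/1, by 1 otherwise), and fixed the guard's precedence slip so an id missing either ':' frame marker is rejected.
-- intended difference: On strings carrying exactly one of the two ':' frame markers, A's guard 'not startswith and not endswith' fails to fire and A strips and decodes the body anyway (e.g. ':a' -> ''), while B returns 'ERROR', the intended value for an incompletely framed id. — e.g. on idToPlace(":a"): A returns "", B returns "ERROR"
import Mathlib
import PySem

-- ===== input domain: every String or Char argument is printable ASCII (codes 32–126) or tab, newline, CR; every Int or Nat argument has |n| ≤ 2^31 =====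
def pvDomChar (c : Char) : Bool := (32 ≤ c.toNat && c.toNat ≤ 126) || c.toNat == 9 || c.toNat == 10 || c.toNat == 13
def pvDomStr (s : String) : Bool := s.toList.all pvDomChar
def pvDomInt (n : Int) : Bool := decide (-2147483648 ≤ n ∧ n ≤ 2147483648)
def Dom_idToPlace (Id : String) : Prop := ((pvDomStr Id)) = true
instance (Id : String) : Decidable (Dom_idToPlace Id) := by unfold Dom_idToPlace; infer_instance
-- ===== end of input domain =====

-- B replaces A's Next/Low/Up flag state machine with a direct two-character consuming loop and
-- fixes A's guard precedence slip (A errors only when BOTH ':' are missing); objective: alternative.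


-- ===== PORT A =====
-- state = (Next, Low, Up, Write); one fold step = one iteration of A's for-loop
def idToPlaceStep (s : Bool × Bool × Bool × List Char) (c : Char) : Bool × Bool × Bool × List Char :=
  let (next, low, up, w) := s
  if !next then
    match PySem.Int.ofChars? [c] with
    | none => s  -- int(I) raises ValueError here; such inputs are outside Pre_idToPlace
    | some d =>
      let low := if d = 0 then true else low
      let next := if d = 0 then true else next
      let up := if d = 1 then true else up
      let next := if d = 1 then true else next
      let w := if d = 2 then w ++ ['\\'] else w
      (next, low, up, w)
  else
    let w := if up then w ++ [PySem.Chars.upperChar c]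
             else if low then w ++ [PySem.Chars.lowerChar c] else w
    (false, false, false, w)

def idToPlace (Id : String) : String :=
  if !PySem.Str.startswith Id ":" && !PySem.Str.endswith Id ":" then "ERROR"
  else
    let l := PySem.List.slice Id.toList (some 1) none        -- Id = Id[1:]
    let l := PySem.List.slice l none (some (-1))             -- Id = Id[:-1]
    String.ofList (l.foldl idToPlaceStep (false, false, false, [])).2.2.2

-- ===== PORT B =====
-- Source B's while-loop advances i by 1 or 2 reading s[i], s[i+1]; ported as recursion on the
-- remaining suffix (head = s[i], second = s[i+1]); out.append/"".join becomes list cons.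
def idToPlaceDecode : List Char → List Char
  | [] => []
  | [c] =>
    match PySem.Int.ofChars? [c] with
    | none => []  -- int(s[i]) raises ValueError here; outside Pre_idToPlace
    | some d => if d = 2 then ['\\'] else []
  | c :: p :: rest =>
    match PySem.Int.ofChars? [c] with
    | none => []  -- int(s[i]) raises ValueError here; outside Pre_idToPlace
    | some d =>
      if d = 0 then PySem.Chars.lowerChar p :: idToPlaceDecode rest
      else if d = 1 then PySem.Chars.upperChar p :: idToPlaceDecode rest
      else if d = 2 then '\\' :: idToPlaceDecode (p :: rest)
      else idToPlaceDecode (p :: rest)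

def idToPlace_alt (Id : String) : String :=
  if !(PySem.Str.startswith Id ":" && PySem.Str.endswith Id ":") then "ERROR"
  else String.ofList (idToPlaceDecode (PySem.List.slice Id.toList (some 1) (some (-1))))

-- ===== PRECONDITION & SPEC =====
-- shape of a well-formed body: a sequence of tokens, each either a control digit 0/1 followed by
-- one payload character, or a single control digit 2-9, with an optional dangling 0/1 at the end;
-- every control position must hold a character int() accepts (these are where A calls int)
def wfCtl : List Char → Bool
  | [] => true
  | [c] => (PySem.Int.ofChars? [c]).isSome
  | c :: p :: rest =>
    match PySem.Int.ofChars? [c] with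
    | none => false
    | some d => if d = 0 ∨ d = 1 then wfCtl rest else wfCtl (p :: rest)

-- Pre_ excludes exactly the inputs where A raises ValueError: a string carrying a ':' frame marker
-- whose stripped body has a non-digit in a control position.
def Pre_idToPlace (Id : String) : Prop :=
  (PySem.Str.startswith Id ":" || PySem.Str.endswith Id ":") = true →
    wfCtl Id.toList.tail.dropLast = true
instance (Id : String) : Decidable (Pre_idToPlace Id) := by unfold Pre_idToPlace; infer_instance
def pvWitness_idToPlace : String := ":0a1b2:"

-- On strings with exactly one of the two ':' frame markers, A's `not starts and not ends` precedence
-- slip lets it strip and decode the body anyway, while B returns "ERROR", the intended value for an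
-- incompletely framed id.
def D_idToPlace (Id : String) : Prop :=
  PySem.Str.startswith Id ":" ≠ PySem.Str.endswith Id ":"
instance (Id : String) : Decidable (D_idToPlace Id) := by unfold D_idToPlace; infer_instance

def Spec_idToPlace (Id : String) (out : String) : Prop :=
  ¬ D_idToPlace Id → out = idToPlace_alt Id
instance (Id : String) (out : String) : Decidable (Spec_idToPlace Id out) := by
  unfold Spec_idToPlace; infer_instance

def pvDiffWitness_idToPlace : String := ":a"
def pvDiffWitnessOut_idToPlace : String × String := ("", "ERROR")

-- ===== CLAIM (what is proved, stated in full; the proofs are below) =====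
def Claim_unchanged_idToPlace : Prop :=
  ∀ (Id : String), Dom_idToPlace Id → Pre_idToPlace Id → Spec_idToPlace Id (idToPlace Id)
def Claim_changed_idToPlace : Prop :=
  Dom_idToPlace (pvDiffWitness_idToPlace) ∧ Pre_idToPlace (pvDiffWitness_idToPlace) ∧
  D_idToPlace (pvDiffWitness_idToPlace) ∧
  idToPlace (pvDiffWitness_idToPlace) = pvDiffWitnessOut_idToPlace.1 ∧
  idToPlace_alt (pvDiffWitness_idToPlace) = pvDiffWitnessOut_idToPlace.2 ∧
  pvDiffWitnessOut_idToPlace.1 ≠ pvDiffWitnessOut_idToPlace.2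

-- ===== LEMMAS AND PROOFS =====

-- the two one-sided slices of port A compose to the single slice of port B
theorem slice_one_neg_one (l : List Char) :
    PySem.List.slice l (some 1) (some (-1)) =
      PySem.List.slice (PySem.List.slice l (some 1) none) none (some (-1)) := by
  cases l with
  | nil => rfl
  | cons x xs =>
    simp [pysem, PySem.List.slice, PySem.List.clampIdx]
    cases xs with
    | nil => simp
    | cons y ys =>
      have h : ¬ ((ys.length : Int) + 1 < 0) := by omega
      simp [h]

-- the state-machine fold computes the two-character decoder on well-formed bodies
theorem foldl_step_eq_decode (l : List Char) (w : List Char) (h : wfCtl l = true) :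
    (l.foldl idToPlaceStep (false, false, false, w)).2.2.2 = w ++ idToPlaceDecode l := by
  induction l using idToPlaceDecode.induct generalizing w with
  | case1 => simp [idToPlaceDecode]
  | case2 c hn => simp [wfCtl, hn] at h
  | case3 c hd => simp [idToPlaceStep, idToPlaceDecode, hd]
  | case4 c d hd hne => simp [idToPlaceStep, idToPlaceDecode, hd, hne]
  | case5 c p rest hn => simp [wfCtl, hn] at h
  | case6 c p rest hd ih =>
    simp only [wfCtl, hd] at h
    simp only [List.foldl_cons]
    have s1 : idToPlaceStep (false, false, false, w) c = (true, true, false, w) := by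
      simp [idToPlaceStep, hd]
    have s2 : idToPlaceStep (true, true, false, w) p
        = (false, false, false, w ++ [PySem.Chars.lowerChar p]) := by
      simp [idToPlaceStep]
    rw [s1, s2, ih _ (by simpa using h)]
    simp [idToPlaceDecode, hd]
  | case7 c p rest hd hne ih =>
    simp only [wfCtl, hd] at h
    simp only [List.foldl_cons]
    have s1 : idToPlaceStep (false, false, false, w) c = (true, false, true, w) := by
      simp [idToPlaceStep, hd]
    have s2 : idToPlaceStep (true, false, true, w) p
        = (false, false, false, w ++ [PySem.Chars.upperChar p]) := by
      simp [idToPlaceStep]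
    rw [s1, s2, ih _ (by simpa using h)]
    simp [idToPlaceDecode, hd]
  | case8 c p rest hd h0 h1 ih =>
    simp only [wfCtl, hd] at h
    simp only [List.foldl_cons]
    have s1 : idToPlaceStep (false, false, false, w) c
        = (false, false, false, w ++ ['\\']) := by simp [idToPlaceStep, hd]
    rw [s1]
    have := ih (w ++ ['\\']) (by simpa using h)
    simp only [List.foldl_cons] at this
    rw [this]
    simp [idToPlaceDecode, hd]
  | case9 c p rest d hd h0 h1 h2 ih =>
    rw [show wfCtl (c :: p :: rest) = wfCtl (p :: rest) from by
      simp [wfCtl, hd, h0, h1]] at h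
    simp only [List.foldl_cons]
    have s1 : idToPlaceStep (false, false, false, w) c = (false, false, false, w) := by
      simp [idToPlaceStep, hd, h0, h1, h2]
    rw [s1]
    have := ih w (by simpa using h)
    simp only [List.foldl_cons] at this
    rw [this]
    simp [idToPlaceDecode, hd, h0, h1, h2]

-- ===== VERDICT (by name: the statement is the Claim_ definition above) =====
theorem idToPlace_spec : Claim_unchanged_idToPlace := by
  intro Id hDom hPre hND
  unfold D_idToPlace at hND
  rw [not_ne_iff] at hND
  have hcol : (":" : String).toList = [':'] := rfl
  cases hs : PySem.Str.startswith Id ":" <;> cases he : PySem.Str.endswith Id ":" <;>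
    simp only [pysem, hcol] at hs he
  · simp [idToPlace, idToPlace_alt, pysem, hcol, hs, he]
  · have he' : PySem.Chars.endswith Id.toList [':'] = true := by
      rw [PySem.Chars.endswith_iff]; exact he
    simp [pysem, hcol, hs, he'] at hND
  · have hs' : PySem.Chars.startswith Id.toList [':'] = true := by
      rw [PySem.Chars.startswith_iff]; exact hs
    simp [pysem, hcol, hs', he] at hND
  · have hs' : PySem.Chars.startswith Id.toList [':'] = true := by
      rw [PySem.Chars.startswith_iff]; exact hs
    have he' : PySem.Chars.endswith Id.toList [':'] = true := by
      rw [PySem.Chars.endswith_iff]; exact he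
    have hwf : wfCtl Id.toList.tail.dropLast = true := by
      refine hPre ?_
      simp only [PySem.Str.startswith_eq, PySem.Str.endswith_eq, hcol, hs', he', Bool.or_self]
    have hm : PySem.List.slice (PySem.List.slice Id.toList (some 1) none) none (some (-1))
        = Id.toList.tail.dropLast := by
      rw [PySem.List.slice_from_one, PySem.List.slice_to_neg_one]
    have gA : (!PySem.Str.startswith Id ":" && !PySem.Str.endswith Id ":") = false := by
      simp only [PySem.Str.startswith_eq, PySem.Str.endswith_eq, hcol, hs', he']
      rfl
    have gB : (!(PySem.Str.startswith Id ":" && PySem.Str.endswith Id ":")) = false := by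
      simp only [PySem.Str.startswith_eq, PySem.Str.endswith_eq, hcol, hs', he']
      rfl
    simp only [idToPlace, idToPlace_alt, gA, gB, Bool.false_eq_true, if_false]
    rw [slice_one_neg_one, hm, foldl_step_eq_decode _ [] hwf]
    simp

theorem idToPlace_changed : Claim_changed_idToPlace := by
  unfold Claim_changed_idToPlace; decide
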